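-- pv_equiv track=rewrite | github.com/tyj513/linebot_nttu | flaskr/api_linebot_backup.py | add_character_after_percentage
-- ===== SOURCE A (Python) =====
-- def add_character_after_percentage(input_string, character):
--     output_string = ""
--     i = 0
--     while i < len(input_string):
--         if input_string[i] == "%":
--             output_string += "%" + character
--         else:
--             output_string += input_string[i]
--         i += 1
--     return output_string
-- ===== SOURCE B (Python) =====
-- def add_character_after_percentage(input_string, character):
--     pieces = input_string.split("%")
--     return ("%" + character).join(pieces)
-- ===== Notes on version B (the rewrite author's own statement) =====
-- stated objective: faster
-- what changed: B splits the string into the segments between percent signs and rejoins them with '%'+character, instead of A's per-character index loop with a branch and a string concatenation at every position.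
import Mathlib
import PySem

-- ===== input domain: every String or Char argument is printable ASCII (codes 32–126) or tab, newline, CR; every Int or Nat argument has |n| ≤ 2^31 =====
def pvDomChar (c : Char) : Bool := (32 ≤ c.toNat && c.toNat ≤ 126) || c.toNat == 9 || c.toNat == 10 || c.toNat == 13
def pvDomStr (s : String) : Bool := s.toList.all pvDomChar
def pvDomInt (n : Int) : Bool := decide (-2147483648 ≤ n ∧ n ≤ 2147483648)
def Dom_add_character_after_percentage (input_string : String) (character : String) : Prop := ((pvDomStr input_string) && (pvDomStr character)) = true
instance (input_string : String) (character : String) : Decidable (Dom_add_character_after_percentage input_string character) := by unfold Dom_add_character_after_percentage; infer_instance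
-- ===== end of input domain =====

-- B replaces A's per-character index loop by split-on-'%' then rejoin with '%'+character (idiomatic).

-- ===== PORT A =====
-- A scans character by character, appending "%"+character for '%' and the character itself otherwise.
def add_character_after_percentage (input_string : String) (character : String) : String :=
  String.ofList (input_string.toList.foldl
    (fun output_string ch =>
      output_string ++ (if ch == '%' then '%' :: character.toList else [ch])) [])

-- ===== PORT B =====
-- B: input_string.split("%") rejoined with "%" + character.
def add_character_after_percentage_alt (input_string : String) (character : String) : String :=
  String.ofList (PySem.Chars.join ('%' :: character.toList)
    (PySem.Chars.splitOn input_string.toList ['%']))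

-- ===== PRECONDITION & SPEC =====
def Spec_add_character_after_percentage (input_string : String) (character : String) (out : String) : Prop := out = add_character_after_percentage_alt input_string character
instance (input_string : String) (character : String) (out : String) : Decidable (Spec_add_character_after_percentage input_string character out) := by unfold Spec_add_character_after_percentage; infer_instance

-- ===== CLAIM (what is proved, stated in full; the proofs are below) =====
def Claim_equal_add_character_after_percentage : Prop := ∀ (input_string : String) (character : String), Dom_add_character_after_percentage input_string character → Spec_add_character_after_percentage input_string character (add_character_after_percentage input_string character)

-- ===== LEMMAS AND PROOFS =====

-- Reference recursion for splitting on the single separator '%'.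
def pvSplitPct : List Char → List Char → List (List Char)
  | [], cur => [cur.reverse]
  | c :: rest, cur =>
      if c = '%' then cur.reverse :: pvSplitPct rest []
      else pvSplitPct rest (c :: cur)

theorem pvSplitPct_ne_nil (l cur : List Char) : pvSplitPct l cur ≠ [] := by
  induction l generalizing cur with
  | nil => simp [pvSplitPct]
  | cons c rest ih =>
    simp only [pvSplitPct]
    split_ifs
    · simp
    · exact ih _

theorem pvSplitPct_go (l : List Char) (fuel : Nat) (cur : List Char)
    (acc : List (List Char)) (h : l.length ≤ fuel) :
    PySem.Chars.splitOn.go ['%'] fuel l cur acc = acc.reverse ++ pvSplitPct l cur := by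
  induction l generalizing fuel cur acc with
  | nil =>
    cases fuel with
    | zero => simp [PySem.Chars.splitOn.go, pvSplitPct]
    | succ n => simp [PySem.Chars.splitOn.go, pvSplitPct]
  | cons c rest ih =>
    cases fuel with
    | zero => simp at h
    | succ n =>
      simp only [PySem.Chars.splitOn.go, pvSplitPct]
      by_cases hc : c = '%'
      · subst hc
        rw [if_pos (by simp [List.isPrefixOf]), if_pos rfl]
        simp only [List.length_cons, List.length_nil, List.drop_succ_cons, List.drop_zero]
        rw [ih n [] (cur.reverse :: acc) (by simpa using Nat.le_of_succ_le_succ h)]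
        simp
      · rw [if_neg (by simp [List.isPrefixOf]; exact fun h' => hc h'.symm), if_neg hc]
        exact ih n (c :: cur) acc (by simpa using Nat.le_of_succ_le_succ h)

theorem splitOn_pct (l : List Char) :
    PySem.Chars.splitOn l ['%'] = pvSplitPct l [] := by
  simpa using pvSplitPct_go l (l.length + 1) [] [] (Nat.le_succ _)

theorem join_pvSplitPct (k : List Char) (l cur : List Char) :
    PySem.Chars.join ('%' :: k) (pvSplitPct l cur)
      = cur.reverse ++ l.flatMap (fun ch => if ch == '%' then '%' :: k else [ch]) := by
  induction l generalizing cur with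
  | nil => simp [pvSplitPct, PySem.Chars.join_singleton]
  | cons c rest ih =>
    simp only [pvSplitPct]
    by_cases hc : c = '%'
    · subst hc
      rw [if_pos rfl]
      obtain ⟨q, qs, hq⟩ : ∃ q qs, pvSplitPct rest ([] : List Char) = q :: qs := by
        cases hp : pvSplitPct rest [] with
        | nil => exact absurd hp (pvSplitPct_ne_nil _ _)
        | cons q qs => exact ⟨q, qs, rfl⟩
      rw [hq, PySem.Chars.join_cons_cons, ← hq, ih []]
      simp
    · rw [if_neg hc, ih (c :: cur)]
      simp [hc]

-- ===== VERDICT (by name: the statement is the Claim_ definition above) =====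
theorem add_character_after_percentage_spec : Claim_equal_add_character_after_percentage := by
  intro s c _
  show _ = _
  unfold add_character_after_percentage add_character_after_percentage_alt
  rw [splitOn_pct, join_pvSplitPct, PySem.List.foldl_append_eq_flatMap]
  simp
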